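-- pv_equiv track=rewrite | github.com/kkobug/algorithm_study | programmers/기출/kakao2019/징검다리 건너기.py | is_crossable
-- ===== SOURCE A (Python) =====
-- def is_crossable(stones, k, number_of_people):
--     passed_people = number_of_people
--     position = -1
--     for p in range(len(stones)):
--         stone = stones[p] - passed_people
--         if 0 < stone:
--             position = p
--         else:
--             if k <= p - position:
--                 return False
--     return True
-- ===== SOURCE B (Python) =====
-- def is_crossable(stones, k, number_of_people):
--     # Sliding-window view: crossing fails iff some window of w consecutive
--     # stones has max <= number_of_people (w = k, and any k <= 0 degenerates
--     # to single-stone windows, since a run "of length >= k" then means any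
--     # unreachable stone at all).
--     w = max(k, 1)
--     for i in range(len(stones) - w + 1):
--         if max(stones[i:i + w]) <= number_of_people:
--             return False
--     return True
-- ===== Notes on version B (the rewrite author's own statement) =====
-- stated objective: alternative
-- what changed: A scans once tracking the last passable position and the current blocked-run length; B reframes the check as a sliding-window-maximum test: it fails iff some window of max(k,1) consecutive stones has max <= number_of_people.
import Mathlib
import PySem

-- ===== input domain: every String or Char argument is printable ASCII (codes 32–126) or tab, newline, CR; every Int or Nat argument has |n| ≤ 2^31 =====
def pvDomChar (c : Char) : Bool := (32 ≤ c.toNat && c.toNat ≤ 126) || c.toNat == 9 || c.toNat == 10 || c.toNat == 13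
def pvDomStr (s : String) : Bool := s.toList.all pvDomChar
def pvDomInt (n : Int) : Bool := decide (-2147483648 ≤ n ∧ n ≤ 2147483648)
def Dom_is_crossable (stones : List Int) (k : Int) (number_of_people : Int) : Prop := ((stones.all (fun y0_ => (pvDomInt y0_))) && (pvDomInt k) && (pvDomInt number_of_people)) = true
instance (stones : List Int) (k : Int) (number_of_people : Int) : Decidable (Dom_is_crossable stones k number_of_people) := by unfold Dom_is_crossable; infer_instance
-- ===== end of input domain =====

-- B replaces A's single blocked-run scan by a sliding-window-maximum check (alternative decomposition, same O(n·k)-vs-O(n) honesty: B is not faster).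


-- ===== PORT A =====
-- A's 'for p in range(len(stones))' with early return, as structural recursion carrying p and position.
def isCrossLoop (k npe : Int) : List Int → Int → Int → Bool
  | [], _, _ => true
  | s :: rest, p, position =>
    if 0 < s - npe then isCrossLoop k npe rest (p + 1) p
    else if k ≤ p - position then false
    else isCrossLoop k npe rest (p + 1) position

def is_crossable (stones : List Int) (k : Int) (number_of_people : Int) : Bool :=
  isCrossLoop k number_of_people stones 0 (-1)

-- ===== PORT B =====
-- B's 'for i in range(len(stones)-w+1): if max(stones[i:i+w]) <= npe: return False'.
-- The 'none' branch of max? (Python's max([]) ValueError) is unreachable: every window has length w ≥ 1.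
def is_crossable_alt (stones : List Int) (k : Int) (number_of_people : Int) : Bool :=
  let w : Int := max k 1
  (PySem.List.pyRange 0 ((stones.length : Int) - w + 1) 1).all fun i =>
    match PySem.List.max? (PySem.List.slice stones (some i) (some (i + w))) (fun x => x) with
    | some m => decide (number_of_people < m)
    | none => true

-- ===== PRECONDITION & SPEC =====
def Spec_is_crossable (stones : List Int) (k : Int) (number_of_people : Int) (out : Bool) : Prop := out = is_crossable_alt stones k number_of_people
instance (stones : List Int) (k : Int) (number_of_people : Int) (out : Bool) : Decidable (Spec_is_crossable stones k number_of_people out) := by unfold Spec_is_crossable; infer_instance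

-- ===== CLAIM (what is proved, stated in full; the proofs are below) =====
def Claim_equal_is_crossable : Prop := ∀ (stones : List Int) (k : Int) (number_of_people : Int), Dom_is_crossable stones k number_of_people → Spec_is_crossable stones k number_of_people (is_crossable stones k number_of_people)

-- ===== LEMMAS AND PROOFS =====

-- "some window of w consecutive entries of l is all true"
def Win (w : Nat) (l : List Bool) : Prop :=
  ∃ i : Nat, i + w ≤ l.length ∧ ∀ j : Nat, j < w → l[i + j]? = some true

lemma win_of_prefix {w c : Nat} (t : List Bool) (h : w ≤ c) :
    Win w (List.replicate c true ++ t) := by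
  refine ⟨0, by simp; omega, fun j hj => ?_⟩
  rw [List.getElem?_append_left (by simp; omega)]
  simp [List.getElem?_replicate]; omega

lemma not_win_replicate {w c : Nat} (hc : c < w) : ¬ Win w (List.replicate c true) := by
  rintro ⟨i, h1, _⟩
  simp [List.length_replicate] at h1
  omega

lemma win_skip_false {w c : Nat} (t : List Bool) (hc : c < w) :
    Win w (List.replicate c true ++ false :: t) ↔ Win w t := by
  constructor
  · rintro ⟨i, h1, h2⟩
    by_cases hi : i ≤ c
    · exfalso
      have := h2 (c - i) (by omega)
      rw [show i + (c - i) = c by omega] at this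
      rw [List.getElem?_append_right (by simp)] at this
      simp at this
    · refine ⟨i - (c + 1), by simp at h1 ⊢; omega, fun j hj => ?_⟩
      have := h2 j hj
      rw [List.getElem?_append_right (by simp; omega)] at this
      rw [List.length_replicate] at this
      rw [show i + j - c = (i - (c+1) + j) + 1 by omega] at this
      simpa using this
  · rintro ⟨i, h1, h2⟩
    refine ⟨c + 1 + i, by simp; omega, fun j hj => ?_⟩
    rw [List.getElem?_append_right (by simp; omega)]
    rw [List.length_replicate, show c + 1 + i + j - c = (i + j) + 1 by omega]
    simpa using h2 j hj

lemma isCrossLoop_char (k npe : Int) (w : Nat) (hw : w = (max k 1).toNat) :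
    ∀ (rest : List Int) (p position : Int), position < p → (p - position - 1).toNat < w →
      (isCrossLoop k npe rest p position = false ↔
        Win w (List.replicate (p - position - 1).toNat true ++
               rest.map (fun s => decide (s ≤ npe)))) := by
  intro rest
  induction rest with
  | nil =>
    intro p position _ hc
    simp only [isCrossLoop, List.map_nil, List.append_nil]
    constructor
    · intro h; cases h
    · intro h; exact absurd h (not_win_replicate hc)
  | cons s rest ih =>
    intro p position hpp hc
    simp only [isCrossLoop, List.map_cons]
    by_cases hs : 0 < s - npe
    · rw [if_pos hs]
      have hb : (decide (s ≤ npe)) = false := by simp; omega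
      rw [hb]
      have := ih (p + 1) p (by omega) (by omega)
      rw [show (p + 1 - p - 1).toNat = 0 by omega] at this
      simp only [List.replicate_zero, List.nil_append] at this
      rw [this, win_skip_false _ hc]
    · rw [if_neg hs]
      have hb : (decide (s ≤ npe)) = true := by simp; omega
      rw [hb]
      by_cases hk : k ≤ p - position
      · rw [if_pos hk]
        have hwin : Win w (List.replicate (p - position - 1).toNat true ++ true :: rest.map (fun s => decide (s ≤ npe))) := by
          rw [show (List.replicate (p - position - 1).toNat true ++ true :: rest.map (fun s => decide (s ≤ npe)))
                = List.replicate ((p - position - 1).toNat + 1) true ++ rest.map (fun s => decide (s ≤ npe)) by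
              rw [List.replicate_succ']; simp]
          exact win_of_prefix _ (by omega)
        simpa using hwin
      · rw [if_neg hk]
        have := ih (p + 1) position (by omega) (by omega)
        rw [show (p + 1 - position - 1).toNat = (p - position - 1).toNat + 1 by omega] at this
        rw [this, List.replicate_succ']
        simp

lemma all_le_of_max?_le {l : List Int} {m npe : Int}
    (hm : PySem.List.max? l (fun x => x) = some m) (h : m ≤ npe) :
    ∀ x ∈ l, x ≤ npe := fun x hx => le_trans (PySem.List.max?_isMax hm x hx) h

lemma alt_char (stones : List Int) (k npe : Int) :
    is_crossable_alt stones k npe = false ↔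
      Win (max k 1).toNat (stones.map (fun s => decide (s ≤ npe))) := by
  unfold is_crossable_alt
  set w : Int := max k 1 with hw
  have hw1 : 1 ≤ w := le_max_right _ _
  rw [List.all_eq_false]
  constructor
  · rintro ⟨i, hmem, hfi⟩
    rw [PySem.List.mem_pyRange_one] at hmem
    obtain ⟨hi0, hiub⟩ := hmem
    -- the window: slice stones i (i+w) = (stones.drop i.toNat).take w.toNat
    have hslice : PySem.List.slice stones (some i) (some (i + w)) =
        (stones.drop i.toNat).take ((i + w).toNat - i.toNat) :=
      PySem.List.slice_toNat stones hi0 (by omega)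
    set win := (stones.drop i.toNat).take ((i + w).toNat - i.toNat) with hwin
    rw [hslice] at hfi
    have hlen : win.length = w.toNat := by
      simp [hwin]; omega
    have hne : win ≠ [] := by
      intro h; rw [h] at hlen; simp at hlen; omega
    cases hmax : PySem.List.max? win (fun x => x) with
    | none =>
      rw [PySem.List.max?_eq_none_iff] at hmax
      exact absurd hmax hne
    | some m =>
      rw [hmax] at hfi
      have hm_le : m ≤ npe := by simpa using hfi
      have hall : ∀ x ∈ win, x ≤ npe := all_le_of_max?_le hmax hm_le
      refine ⟨i.toNat, by simp; omega, fun j hj => ?_⟩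
      have hjlt : i.toNat + j < stones.length := by omega
      have hxmem : stones[i.toNat + j] ∈ win := by
        rw [hwin]
        rw [List.mem_iff_getElem]
        exact ⟨j, by simp; omega, by
          rw [List.getElem_take, List.getElem_drop]⟩
      have := hall _ hxmem
      rw [List.getElem?_map]
      simp [List.getElem?_eq_getElem hjlt, this]
  · rintro ⟨i, h1, h2⟩
    rw [List.length_map] at h1
    refine ⟨(i : Int), ?_, ?_⟩
    · rw [PySem.List.mem_pyRange_one]; constructor <;> omega
    · have hslice : PySem.List.slice stones (some (i : Int)) (some ((i : Int) + w)) =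
          (stones.drop i).take w.toNat := by
        rw [PySem.List.slice_toNat stones (by omega) (by omega)]
        congr 1
        omega
      rw [hslice]
      set win := (stones.drop i).take w.toNat with hwin
      have hlen : win.length = w.toNat := by simp [hwin]; omega
      have hall : ∀ x ∈ win, x ≤ npe := by
        intro x hx
        rw [hwin, List.mem_iff_getElem] at hx
        obtain ⟨j, hj, hx⟩ := hx
        rw [List.getElem_take, List.getElem_drop] at hx
        have hj' : j < w.toNat := by
          have := hj; simp at this; omega
        have := h2 j hj'
        rw [List.getElem?_map] at this
        have hjlt : i + j < stones.length := by
          have := hj; simp at this; omega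
        rw [List.getElem?_eq_getElem hjlt] at this
        simp at this
        rw [← hx]; exact this
      cases hmax : PySem.List.max? win (fun x => x) with
      | none =>
        exfalso
        rw [PySem.List.max?_eq_none_iff] at hmax
        rw [hmax] at hlen; simp at hlen; omega
      | some m =>
        have hmmem : m ∈ win := PySem.List.max?_mem hmax
        simp [hall m hmmem]

-- ===== VERDICT (by name: the statement is the Claim_ definition above) =====
theorem is_crossable_spec : Claim_equal_is_crossable := by
  intro stones k npe _
  unfold Spec_is_crossable
  have hA : is_crossable stones k npe = false ↔
      Win (max k 1).toNat (stones.map (fun s => decide (s ≤ npe))) := by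
    have := isCrossLoop_char k npe (max k 1).toNat rfl stones 0 (-1) (by omega) (by omega)
    unfold is_crossable
    rw [this]
    rw [show ((0 : Int) - (-1) - 1).toNat = 0 by omega]
    simp
  have hB := alt_char stones k npe
  have h := hA.trans hB.symm
  cases h1 : is_crossable stones k npe with
  | false => exact (h.mp h1).symm
  | true =>
    cases h2 : is_crossable_alt stones k npe with
    | true => rfl
    | false => rw [h.mpr h2] at h1; cases h1
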